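-- pv_equiv track=rewrite | github.com/Yuki2232/regularbook | main.py | merge_duplicates
-- ===== SOURCE A (Python) =====
-- def merge_duplicates(data):
--   headers = data[0]
--   merged_rows = {}
--   for row in data[1:]:
--     lastname, firstname = row[0], row[1]
--     key = (lastname, firstname)
--     if key not in merged_rows:
--       merged_rows[key] = row.copy()
--     else:
--       existing_row = merged_rows[key]
--       for i in range(len(row)):
--         if not existing_row[i] and row[i]:
--           existing_row[i] = row[i]
--   return [headers] + list(merged_rows.values())
-- ===== SOURCE B (Python) =====
-- def merge_duplicates(data):
--     headers = data[0]
--     groups = {}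
--     for row in data[1:]:
--         groups.setdefault((row[0], row[1]), []).append(row)
--     merged = []
--     for rows in groups.values():
--         first = rows[0]
--         merged.append([
--             next((r[i] for r in rows if i < len(r) and r[i]), first[i])
--             for i in range(len(first))
--         ])
--     return [headers] + merged
-- ===== Notes on version B (the rewrite author's own statement) =====
-- stated objective: simpler
-- what changed: Instead of interleaving dict lookups with in-place cell mutation of the stored row, B first groups the rows by (lastname, firstname) key and then builds each merged row in one comprehension taking, per column of the group's first row, the first non-empty value in the group.
import Mathlib
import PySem

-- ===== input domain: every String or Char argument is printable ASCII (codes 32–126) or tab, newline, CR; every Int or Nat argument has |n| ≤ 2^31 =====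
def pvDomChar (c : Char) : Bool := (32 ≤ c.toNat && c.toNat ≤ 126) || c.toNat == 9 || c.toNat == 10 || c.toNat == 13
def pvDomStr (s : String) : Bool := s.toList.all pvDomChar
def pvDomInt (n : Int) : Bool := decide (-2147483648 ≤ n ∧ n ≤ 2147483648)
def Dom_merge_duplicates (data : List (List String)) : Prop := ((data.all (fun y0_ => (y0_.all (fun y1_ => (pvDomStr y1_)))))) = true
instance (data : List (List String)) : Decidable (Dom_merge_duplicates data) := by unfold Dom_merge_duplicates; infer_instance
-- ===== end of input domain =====

-- B replaces A's interleaved dict-lookup-and-mutate loop by grouping rows per key and building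
-- each merged row columnwise (first non-empty value per column); objective: simpler decomposition.


-- ===== PORT A =====
-- key = (row[0], row[1]); under Pre_ rows have ≥ 2 cells, so getD equals Python's row[0]/row[1]
def pvKey (r : List String) : String × String := (r.getD 0 "", r.getD 1 "")

-- inner loop of A: for i in range(len(row)): if not existing_row[i] and row[i]: existing_row[i] = row[i]
-- (under Pre_ every index is in range for both lists, so getD/set are exact)
def pvFill (ex row : List String) : List String :=
  (List.range row.length).foldl
    (fun ex i => if ex.getD i "" = "" ∧ row.getD i "" ≠ "" then ex.set i (row.getD i "") else ex) ex

def pvStepA (d : PySem.Dict (String × String) (List String)) (row : List String) :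
    PySem.Dict (String × String) (List String) :=
  if d.contains (pvKey row) = false then d.insert (pvKey row) row
  else d.insert (pvKey row) (pvFill (d.getD (pvKey row) []) row)

def merge_duplicates (data : List (List String)) : List (List String) :=
  match data with
  | [] => []   -- Python raises IndexError here (data[0]); excluded by Pre_
  | headers :: rest =>
    headers :: (rest.foldl pvStepA PySem.Dict.empty).values

-- ===== PORT B =====
-- groups.setdefault(key, []).append(row)  ==  d[key] = d.get(key, []) + [row] at key's position
def pvStepB (d : PySem.Dict (String × String) (List (List String))) (row : List String) :
    PySem.Dict (String × String) (List (List String)) :=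
  d.modify (pvKey row) [] (· ++ [row])

-- merged row of one group: per column of the first row, first non-empty value in the group
def pvMergeGroup (rows : List (List String)) : List String :=
  let first := rows.headD []
  (List.range first.length).map (fun i =>
    match rows.find? (fun r => decide (i < r.length) && decide (r.getD i "" ≠ "")) with
    | some r => r.getD i ""
    | none => first.getD i "")

def merge_duplicates_alt (data : List (List String)) : List (List String) :=
  match data with
  | [] => []
  | headers :: rest =>
    headers :: ((rest.foldl pvStepB PySem.Dict.empty).values.map pvMergeGroup)

-- ===== PRECONDITION & SPEC =====
-- Pre_ excludes exactly the inputs on which Python A raises IndexError: empty data (data[0]),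
-- a data row with fewer than 2 cells (row[0], row[1]), or a duplicate row longer than the
-- first row carrying its key (existing_row[i] for i in range(len(row))).
def pvLenOK (tail : List (List String)) (r : List String) : Bool :=
  match tail.find? (fun e => pvKey e == pvKey r) with
  | some f => decide (r.length ≤ f.length)
  | none => true

def Pre_merge_duplicates (data : List (List String)) : Prop :=
  data ≠ [] ∧ ∀ r ∈ data.tail, 2 ≤ r.length ∧ pvLenOK data.tail r = true
instance (data : List (List String)) : Decidable (Pre_merge_duplicates data) := by
  unfold Pre_merge_duplicates; infer_instance

def pvWitness_merge_duplicates : List (List String) :=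
  [["last", "first", "phone"], ["a", "b", ""], ["a", "b", "7"], ["c", "d", "x"]]

def Spec_merge_duplicates (data : List (List String)) (out : List (List String)) : Prop :=
  out = merge_duplicates_alt data
instance (data : List (List String)) (out : List (List String)) : Decidable (Spec_merge_duplicates data out) := by
  unfold Spec_merge_duplicates; infer_instance

-- ===== CLAIM (what is proved, stated in full; the proofs are below) =====
def Claim_equal_merge_duplicates : Prop := ∀ (data : List (List String)), Dom_merge_duplicates data → Pre_merge_duplicates data → Spec_merge_duplicates data (merge_duplicates data)

-- ===== LEMMAS AND PROOFS =====

-- the cell-update step of A's inner loop, named for reasoning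
def pvF (row ex : List String) (i : Nat) : List String :=
  if ex.getD i "" = "" ∧ row.getD i "" ≠ "" then ex.set i (row.getD i "") else ex

theorem pvFill_eq (ex row : List String) :
    pvFill ex row = (List.range row.length).foldl (pvF row) ex := rfl

theorem fillN_succ (row ex : List String) (n : Nat) :
    (List.range (n+1)).foldl (pvF row) ex = pvF row ((List.range n).foldl (pvF row) ex) n := by
  rw [List.range_succ, List.foldl_append]; rfl

theorem pvF_def (row ex : List String) (i : Nat) :
    pvF row ex i = if ex.getD i "" = "" ∧ row.getD i "" ≠ "" then ex.set i (row.getD i "") else ex := rfl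

theorem length_fillN (row ex : List String) (n : Nat) :
    ((List.range n).foldl (pvF row) ex).length = ex.length := by
  induction n with
  | zero => rfl
  | succ n ih => rw [fillN_succ, pvF_def]; split_ifs <;> simp [ih]

theorem length_pvFill (ex row : List String) : (pvFill ex row).length = ex.length :=
  length_fillN row ex row.length

theorem getD_out {l : List String} {i : Nat} (h : l.length ≤ i) : l.getD i "" = "" := by
  rw [List.getD_eq_getElem?_getD, List.getElem?_eq_none (by omega)]; rfl

theorem getD_fillN (row ex : List String) (n : Nat) (hn : n ≤ ex.length) (i : Nat) :
    ((List.range n).foldl (pvF row) ex).getD i "" =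
      if ex.getD i "" = "" ∧ i < n ∧ row.getD i "" ≠ "" then row.getD i "" else ex.getD i "" := by
  induction n generalizing i with
  | zero => simp
  | succ n ih =>
    have hn' : n ≤ ex.length := by omega
    have hFn : ((List.range n).foldl (pvF row) ex).getD n "" = ex.getD n "" := by
      rw [ih hn' n]; simp
    rw [fillN_succ, pvF_def, hFn]
    by_cases hc : ex.getD n "" = "" ∧ row.getD n "" ≠ ""
    · rw [if_pos hc, List.getD_eq_getElem?_getD, List.getElem?_set]
      by_cases hin : n = i
      · subst hin
        rw [if_pos rfl, if_pos (by rw [length_fillN]; omega)]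
        simp only [Option.getD_some]
        rw [if_pos ⟨hc.1, by omega, hc.2⟩]
      · rw [if_neg hin, ← List.getD_eq_getElem?_getD, ih hn' i]
        by_cases h1 : ex.getD i "" = "" ∧ i < n ∧ row.getD i "" ≠ ""
        · rw [if_pos h1, if_pos ⟨h1.1, by omega, h1.2.2⟩]
        · rw [if_neg h1, if_neg (by
            rintro ⟨a, b, c⟩
            exact h1 ⟨a, by omega, c⟩)]
    · rw [if_neg hc, ih hn' i]
      by_cases hin : i = n
      · subst hin
        rw [if_neg (by rintro ⟨a, b, c⟩; omega),
            if_neg (by rintro ⟨a, b, c⟩; exact hc ⟨a, c⟩)]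
      · by_cases h1 : ex.getD i "" = "" ∧ i < n ∧ row.getD i "" ≠ ""
        · rw [if_pos h1, if_pos ⟨h1.1, by omega, h1.2.2⟩]
        · rw [if_neg h1, if_neg (by rintro ⟨a, b, c⟩; exact h1 ⟨a, by omega, c⟩)]

theorem getD_pvFill (ex row : List String) (h : row.length ≤ ex.length) (i : Nat) :
    (pvFill ex row).getD i "" =
      if ex.getD i "" = "" ∧ i < row.length ∧ row.getD i "" ≠ "" then row.getD i "" else ex.getD i "" := by
  rw [pvFill_eq]; exact getD_fillN row ex row.length h i

theorem pred_true {r : List String} {i : Nat} (h1 : i < r.length) (h2 : r.getD i "" ≠ "") :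
    (decide (i < r.length) && decide (r.getD i "" ≠ "")) = true := by
  rw [decide_eq_true h1, decide_eq_true h2]; rfl

theorem pred_false {r : List String} {i : Nat} (h : ¬ (i < r.length ∧ r.getD i "" ≠ "")) :
    (decide (i < r.length) && decide (r.getD i "" ≠ "")) = false := by
  by_cases d1 : i < r.length
  · have d2 : ¬ r.getD i "" ≠ "" := fun hh => h ⟨d1, hh⟩
    rw [decide_eq_true d1, decide_eq_false d2, Bool.true_and]
  · rw [decide_eq_false d1, Bool.false_and]

-- columnwise characterisation of A's accumulated merge over one key group
theorem getD_foldl_pvFill (rs : List (List String)) (f : List String)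
    (h : ∀ r ∈ rs, r.length ≤ f.length) (i : Nat) :
    (rs.foldl pvFill f).getD i "" =
      (match (f :: rs).find? (fun r => decide (i < r.length) && decide (r.getD i "" ≠ "")) with
       | some r => r.getD i ""
       | none => f.getD i "") := by
  set P : List String → Bool := fun r => decide (i < r.length) && decide (r.getD i "" ≠ "") with hP
  induction rs generalizing f with
  | nil =>
    simp only [List.foldl_nil]
    by_cases hp : i < f.length ∧ f.getD i "" ≠ ""
    · rw [List.find?_cons_of_pos (show P f = true from pred_true hp.1 hp.2)]
    · rw [List.find?_cons_of_neg (show ¬ P f = true from by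
          rw [show P f = false from pred_false hp]; exact Bool.false_ne_true),
        List.find?_nil]
  | cons r rs ih =>
    have hrf : r.length ≤ f.length := h r (List.mem_cons_self)
    have hlenf : (pvFill f r).length = f.length := length_pvFill f r
    have h' : ∀ r' ∈ rs, r'.length ≤ (pvFill f r).length := by
      intro r' hr'; rw [hlenf]; exact h r' (List.mem_cons_of_mem r hr')
    rw [List.foldl_cons, ih (pvFill f r) h']
    have hgf := getD_pvFill f r hrf i
    by_cases h2 : f.getD i "" = ""
    · have hpf : ¬ (i < f.length ∧ f.getD i "" ≠ "") := fun hh => hh.2 h2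
      by_cases h3 : i < r.length ∧ r.getD i "" ≠ ""
      · have hi1 : i < f.length := by omega
        have hval : (pvFill f r).getD i "" = r.getD i "" := by
          rw [hgf, if_pos ⟨h2, h3.1, h3.2⟩]
        rw [List.find?_cons_of_pos (show P (pvFill f r) = true from
              pred_true (hlenf ▸ hi1) (hval ▸ h3.2)),
            List.find?_cons_of_neg (show ¬ P f = true from by
              rw [show P f = false from pred_false hpf]; exact Bool.false_ne_true),
            List.find?_cons_of_pos (show P r = true from pred_true h3.1 h3.2)]
        exact hval
      · have hval : (pvFill f r).getD i "" = f.getD i "" := by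
          rw [hgf, if_neg (by rintro ⟨a, b, c⟩; exact h3 ⟨b, c⟩)]
        have hpf' : ¬ (i < (pvFill f r).length ∧ (pvFill f r).getD i "" ≠ "") := by
          rintro ⟨a, b⟩; exact b (hval.trans h2)
        rw [List.find?_cons_of_neg (show ¬ P (pvFill f r) = true from by
              rw [show P (pvFill f r) = false from pred_false hpf']; exact Bool.false_ne_true),
            List.find?_cons_of_neg (show ¬ P f = true from by
              rw [show P f = false from pred_false hpf]; exact Bool.false_ne_true),
            List.find?_cons_of_neg (show ¬ P r = true from by
              rw [show P r = false from pred_false h3]; exact Bool.false_ne_true)]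
        cases hfind : rs.find? P with
        | some rr => rfl
        | none => simp only [hval]
    · have hi1 : i < f.length := by
        by_contra hcon
        exact h2 (getD_out (by omega))
      have hval : (pvFill f r).getD i "" = f.getD i "" := by
        rw [hgf, if_neg (by rintro ⟨a, b, c⟩; exact h2 a)]
      rw [List.find?_cons_of_pos (show P (pvFill f r) = true from
            pred_true (hlenf ▸ hi1) (by rw [hval]; exact h2)),
          List.find?_cons_of_pos (show P f = true from pred_true hi1 h2)]
      exact hval

theorem length_foldl_pvFill (rs : List (List String)) (f : List String)
    (h : ∀ r ∈ rs, r.length ≤ f.length) :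
    (rs.foldl pvFill f).length = f.length := by
  induction rs generalizing f with
  | nil => rfl
  | cons r rs ih =>
    rw [List.foldl_cons, ih (pvFill f r) (fun r' hr' => by
      rw [length_pvFill]; exact h r' (List.mem_cons_of_mem r hr')), length_pvFill]

-- A's accumulated merge of one group equals B's columnwise merged row
theorem merged_eq (f : List String) (rs : List (List String))
    (h : ∀ r ∈ rs, r.length ≤ f.length) :
    rs.foldl pvFill f = pvMergeGroup (f :: rs) := by
  unfold pvMergeGroup
  simp only [List.headD_cons]
  apply List.ext_getElem
  · rw [length_foldl_pvFill rs f h]; simp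
  · intro i h1 h2
    have hi : i < f.length := by rw [length_foldl_pvFill rs f h] at h1; exact h1
    rw [← List.getD_eq_getElem _ "" h1, getD_foldl_pvFill rs f h i]
    rw [List.getElem_map, List.getElem_range]

-- A's per-key accumulator as a fold over the rows carrying that key
def pvGStep (acc : Option (List String)) (r : List String) : Option (List String) :=
  some (match acc with | none => r | some ex => pvFill ex r)

theorem gfold_some (rs : List (List String)) (ex : List String) :
    rs.foldl pvGStep (some ex) = some (rs.foldl pvFill ex) := by
  induction rs generalizing ex with
  | nil => rfl
  | cons r rs ih => rw [List.foldl_cons, List.foldl_cons]; exact ih (pvFill ex r)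

theorem foldA_get? (l : List (List String)) (d : PySem.Dict (String × String) (List String))
    (c : String × String) :
    (l.foldl pvStepA d).get? c = (l.filter (fun r => pvKey r == c)).foldl pvGStep (d.get? c) := by
  induction l generalizing d with
  | nil => rfl
  | cons r l ih =>
    rw [List.foldl_cons, ih]
    by_cases hk : pvKey r = c
    · rw [show List.filter (fun r => pvKey r == c) (r :: l) = r :: l.filter (fun r => pvKey r == c) by
        simp [hk]]
      rw [List.foldl_cons]
      congr 1
      unfold pvStepA pvGStep
      by_cases hc : d.contains (pvKey r) = false
      · rw [if_pos hc, hk, PySem.Dict.get?_insert_self]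
        have : d.get? c = none := by
          rw [← hk]; exact (PySem.Dict.get?_eq_none_iff_contains d (pvKey r)).mpr hc
        rw [this]
      · rw [if_neg hc, hk, PySem.Dict.get?_insert_self]
        have hsome : (d.get? c).isSome := by
          rw [← hk, ← PySem.Dict.contains_eq_isSome_get?]
          simpa using hc
        obtain ⟨ex, hex⟩ := Option.isSome_iff_exists.mp hsome
        rw [hex]
        have hgd : d.getD c [] = ex := by
          rw [PySem.Dict.getD_eq_get?_getD, hex]; rfl
        rw [hgd]
    · rw [show List.filter (fun r => pvKey r == c) (r :: l) = l.filter (fun r => pvKey r == c) by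
        simp [List.filter_cons]; simpa using hk]
      congr 1
      unfold pvStepA
      have hne : c ≠ pvKey r := fun hh => hk hh.symm
      split_ifs <;> rw [PySem.Dict.get?_insert_of_ne _ _ hne]

theorem foldB_getD (l : List (List String)) (d : PySem.Dict (String × String) (List (List String)))
    (c : String × String) :
    (l.foldl pvStepB d).getD c [] = d.getD c [] ++ l.filter (fun r => pvKey r == c) := by
  induction l generalizing d with
  | nil => simp
  | cons r l ih =>
    rw [List.foldl_cons, ih]
    unfold pvStepB
    rw [PySem.Dict.getD_modify]
    by_cases hk : c = pvKey r
    · rw [if_pos hk, hk, List.filter_cons, if_pos (by simp)]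
      simp
    · rw [if_neg hk, List.filter_cons, if_neg (by simp; exact fun hh => hk hh.symm)]

theorem foldA_keys (l : List (List String)) (d : PySem.Dict (String × String) (List String)) :
    l.foldl pvStepA d = l.foldl (fun d row => d.insert (pvKey row)
      (if d.contains (pvKey row) then pvFill (d.getD (pvKey row) []) row else row)) d := by
  congr 1
  funext d row
  unfold pvStepA
  by_cases h : d.contains (pvKey row) <;> simp [h]

-- ===== VERDICT (by name: the statement is the Claim_ definition above) =====
theorem merge_duplicates_spec : Claim_equal_merge_duplicates := by
  intro data _ hpre
  unfold Spec_merge_duplicates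
  obtain ⟨hne, hrows⟩ := hpre
  match data with
  | [] => exact absurd rfl hne
  | headers :: rest =>
    simp only [List.tail_cons] at hrows
    show merge_duplicates (headers :: rest) = merge_duplicates_alt (headers :: rest)
    unfold merge_duplicates merge_duplicates_alt
    show headers :: (rest.foldl pvStepA PySem.Dict.empty).values =
      headers :: List.map pvMergeGroup (rest.foldl pvStepB PySem.Dict.empty).values
    have ndA : (rest.foldl pvStepA PySem.Dict.empty).keys.Nodup := by
      rw [foldA_keys]
      exact PySem.Dict.nodup_keys_foldl_insert_key rest pvKey _ _ (by simp)
    have ndB : (rest.foldl pvStepB PySem.Dict.empty).keys.Nodup := by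
      exact PySem.Dict.nodup_keys_foldl_modify_key rest pvKey _ _ _ (by simp)
    have hKA : (rest.foldl pvStepA PySem.Dict.empty).keys = PySem.Set.ofList (rest.map pvKey) := by
      rw [foldA_keys, PySem.Dict.keys_foldl_insert_key]
      simp [PySem.Set.update_nil_left]
    have hKB : (rest.foldl pvStepB PySem.Dict.empty).keys = PySem.Set.ofList (rest.map pvKey) := by
      have hh := PySem.Dict.keys_foldl_modify_key rest pvKey []
        (fun d row => (· ++ [row])) PySem.Dict.empty
      simpa [PySem.Set.update_nil_left] using hh
    rw [PySem.Dict.values_eq_map_keys _ ndA [], PySem.Dict.values_eq_map_keys _ ndB [],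
        List.map_map, hKA, hKB]
    congr 1
    apply List.map_eq_map_iff.mpr
    intro k hkmem
    have hk' : k ∈ rest.map pvKey := (PySem.Set.mem_ofList _ _).mp hkmem
    obtain ⟨r0, hr0, hk0⟩ := List.mem_map.mp hk'
    have hB : (rest.foldl pvStepB PySem.Dict.empty).getD k [] =
        rest.filter (fun r => pvKey r == k) := by
      rw [foldB_getD]; simp
    have hr0f : r0 ∈ rest.filter (fun r => pvKey r == k) :=
      List.mem_filter.mpr ⟨hr0, by simp [hk0]⟩
    obtain ⟨f, rs, hcons⟩ := List.exists_cons_of_ne_nil (List.ne_nil_of_mem hr0f)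
    have hf : rest.find? (fun e => pvKey e == k) = some f := by
      rw [← List.head?_filter, hcons]; rfl
    have hlen : ∀ r ∈ rs, r.length ≤ f.length := by
      intro r hr
      have hrrows : r ∈ rest.filter (fun r => pvKey r == k) := by
        rw [hcons]; exact List.mem_cons_of_mem f hr
      have hrrest : r ∈ rest := (List.mem_filter.mp hrrows).1
      have hkr : pvKey r = k := by simpa using (List.mem_filter.mp hrrows).2
      have hok := (hrows r hrrest).2
      unfold pvLenOK at hok
      rw [show (fun e => pvKey e == pvKey r) = (fun e => pvKey e == k) by
        funext e; rw [hkr], hf] at hok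
      simpa using hok
    have hA : (rest.foldl pvStepA PySem.Dict.empty).getD k [] = rs.foldl pvFill f := by
      rw [PySem.Dict.getD_eq_get?_getD, foldA_get?, PySem.Dict.get?_empty, hcons,
          List.foldl_cons]
      rw [show pvGStep none f = some f from rfl, gfold_some]
      rfl
    simp only [Function.comp]
    rw [hA, hB, hcons, merged_eq f rs hlen]
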